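-- pv_equiv track=rewrite | github.com/kolharsam/aoc | codejam/cj.py | cj_jc_counter
-- ===== SOURCE A (Python) =====
-- def cj_jc_counter(st):
--     cj = 0
--     jc = 0
--     for idx, l in enumerate(st[:-1]):
--         if l == 'C' and st[idx+1] == 'J':
--             cj += 1
--         elif l == 'J' and st[idx+1] == 'C':
--             jc += 1
--     return (cj, jc)
-- ===== SOURCE B (Python) =====
-- def cj_jc_counter(st):
--     # Two staged substring searches: 'CJ' and 'JC' are two-character patterns with
--     # distinct characters, so occurrences cannot overlap themselves and str.count
--     # (non-overlapping) counts exactly the adjacent pairs A tallies in its scan.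
--     return (st.count('CJ'), st.count('JC'))
-- ===== Notes on version B (the rewrite author's own statement) =====
-- stated objective: faster
-- what changed: B replaces A's single indexed scan with a per-pair branch by two staged substring counts via str.count, correct because a two-character pattern with distinct characters cannot overlap itself.
import Mathlib
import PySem

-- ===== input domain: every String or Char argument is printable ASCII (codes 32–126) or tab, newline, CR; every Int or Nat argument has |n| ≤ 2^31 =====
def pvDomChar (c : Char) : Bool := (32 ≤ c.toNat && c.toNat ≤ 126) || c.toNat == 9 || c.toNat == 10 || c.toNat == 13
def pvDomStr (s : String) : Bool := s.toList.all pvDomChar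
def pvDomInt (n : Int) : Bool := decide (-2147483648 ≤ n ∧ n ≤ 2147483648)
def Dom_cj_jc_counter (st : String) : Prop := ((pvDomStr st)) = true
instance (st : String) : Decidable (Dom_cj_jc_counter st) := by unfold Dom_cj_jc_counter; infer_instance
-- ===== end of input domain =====

-- B replaces A's indexed scan (one branch per adjacent pair) by two staged substring
-- searches st.count('CJ') and st.count('JC'); exact because a two-character pattern
-- with distinct characters cannot overlap itself.

-- ===== PORT A =====
-- st[idx+1] is ported with PySem.Str.pyGet?; comparison with `some 'J'` is exact because
-- idx ranges over enumerate(st[:-1]) so idx+1 is always in range (Python never raises here).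
def cj_jc_counter (st : String) : Int × Int :=
  (PySem.List.enumerate (PySem.List.slice st.toList none (some (-1))) 0).foldl
    (fun (acc : Int × Int) (p : Int × Char) =>
      if p.2 = 'C' ∧ PySem.Str.pyGet? st (p.1 + 1) = some 'J' then (acc.1 + 1, acc.2)
      else if p.2 = 'J' ∧ PySem.Str.pyGet? st (p.1 + 1) = some 'C' then (acc.1, acc.2 + 1)
      else acc) (0, 0)

-- ===== PORT B =====
-- st.count(sub) is PySem.Str.count (Python's non-overlapping substring count).
def cj_jc_counter_alt (st : String) : Int × Int :=
  ((PySem.Str.count st "CJ" : Int), (PySem.Str.count st "JC" : Int))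

-- ===== PRECONDITION & SPEC =====
def Spec_cj_jc_counter (st : String) (out : Int × Int) : Prop := out = cj_jc_counter_alt st
instance (st : String) (out : Int × Int) : Decidable (Spec_cj_jc_counter st out) := by unfold Spec_cj_jc_counter; infer_instance

-- ===== CLAIM (what is proved, stated in full; the proofs are below) =====
def Claim_equal_cj_jc_counter : Prop := ∀ (st : String), Dom_cj_jc_counter st → Spec_cj_jc_counter st (cj_jc_counter st)

-- ===== LEMMAS AND PROOFS =====

-- Common yardstick: the multiset of adjacent pairs, `zip s s.tail`.

-- The pure step on a realised adjacent pair (for A's side).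
def pvStep (acc : Int × Int) (q : Char × Char) : Int × Int :=
  if q.1 = 'C' ∧ q.2 = 'J' then (acc.1 + 1, acc.2)
  else if q.1 = 'J' ∧ q.2 = 'C' then (acc.1, acc.2 + 1)
  else acc

lemma pvStep_fold (ps : List (Char × Char)) : ∀ (cj jc : Int),
    ps.foldl pvStep (cj, jc)
      = (cj + (ps.count ('C', 'J') : Int), jc + (ps.count ('J', 'C') : Int)) := by
  induction ps with
  | nil => intro cj jc; simp
  | cons q rest ih =>
    intro cj jc
    rcases q with ⟨a, b⟩
    simp only [List.foldl_cons, List.count_cons, pvStep]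
    by_cases h1 : a = 'C' ∧ b = 'J'
    · obtain ⟨ha, hb⟩ := h1
      subst ha; subst hb
      simp [ih]; omega
    · by_cases h2 : a = 'J' ∧ b = 'C'
      · obtain ⟨ha, hb⟩ := h2
        subst ha; subst hb
        simp [ih]; omega
      · have hne1 : ((a, b) : Char × Char) ≠ ('C', 'J') := by
          intro h; exact h1 ⟨congrArg Prod.fst h, congrArg Prod.snd h⟩
        have hne2 : ((a, b) : Char × Char) ≠ ('J', 'C') := by
          intro h; exact h2 ⟨congrArg Prod.fst h, congrArg Prod.snd h⟩
        simp [h1, h2, ih, hne1, hne2]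

-- The enumerate-and-index view of A's loop data equals the zip of adjacent pairs.
lemma pvEnum_map_eq (cs : List Char) :
    (PySem.List.enumerate cs.dropLast 0).map
        (fun (p : Int × Char) => (p.2, (PySem.List.pyGet? cs (p.1 + 1)).getD 'X'))
      = List.zip cs cs.tail := by
  apply List.ext_getElem
  · simp [PySem.List.length_enumerate, List.length_dropLast, List.length_zip,
      List.length_tail]
  · intro k h1 h2
    have hk : k < cs.length - 1 := by
      simpa [PySem.List.length_enumerate, List.length_dropLast] using h1
    have hk1 : k + 1 < cs.length := by omega
    simp only [List.getElem_map, PySem.List.getElem_enumerate, List.getElem_zip,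
      List.getElem_dropLast, List.getElem_tail]
    have : ((0 : Int) + (k : Nat) + 1) = ((k + 1 : Nat) : Int) := by push_cast; ring
    rw [this, PySem.List.pyGet?_natCast]
    simp [List.getElem?_eq_getElem hk1]

lemma pvA_eq_counts (st : String) :
    cj_jc_counter st
      = (((List.zip st.toList st.toList.tail).count ('C', 'J') : Int),
         ((List.zip st.toList st.toList.tail).count ('J', 'C') : Int)) := by
  unfold cj_jc_counter
  rw [PySem.List.slice_to_neg_one]
  have hstep : ∀ (acc : Int × Int) (p : Int × Char),
      (if p.2 = 'C' ∧ PySem.Str.pyGet? st (p.1 + 1) = some 'J' then (acc.1 + 1, acc.2)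
       else if p.2 = 'J' ∧ PySem.Str.pyGet? st (p.1 + 1) = some 'C' then (acc.1, acc.2 + 1)
       else acc)
        = pvStep acc (p.2, (PySem.List.pyGet? st.toList (p.1 + 1)).getD 'X') := by
    intro acc p
    have hg : PySem.Str.pyGet? st (p.1 + 1) = PySem.List.pyGet? st.toList (p.1 + 1) := by
      simp [PySem.Str.pyGet?]
    rw [hg]
    unfold pvStep
    rcases hx : PySem.List.pyGet? st.toList (p.1 + 1) with _ | c
    · simp
    · simp only [Option.some.injEq, Option.getD_some]
      split_ifs <;> rfl
  calc (PySem.List.enumerate st.toList.dropLast 0).foldl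
          (fun (acc : Int × Int) (p : Int × Char) =>
            if p.2 = 'C' ∧ PySem.Str.pyGet? st (p.1 + 1) = some 'J' then (acc.1 + 1, acc.2)
            else if p.2 = 'J' ∧ PySem.Str.pyGet? st (p.1 + 1) = some 'C' then (acc.1, acc.2 + 1)
            else acc) (0, 0)
      = (PySem.List.enumerate st.toList.dropLast 0).foldl
          (fun acc p => pvStep acc (p.2, (PySem.List.pyGet? st.toList (p.1 + 1)).getD 'X'))
          (0, 0) := by
          have hfun : (fun (acc : Int × Int) (p : Int × Char) =>
              if p.2 = 'C' ∧ PySem.Str.pyGet? st (p.1 + 1) = some 'J' then (acc.1 + 1, acc.2)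
              else if p.2 = 'J' ∧ PySem.Str.pyGet? st (p.1 + 1) = some 'C' then (acc.1, acc.2 + 1)
              else acc)
            = (fun acc p => pvStep acc (p.2, (PySem.List.pyGet? st.toList (p.1 + 1)).getD 'X')) := by
            funext acc p; exact hstep acc p
          rw [hfun]
    _ = ((PySem.List.enumerate st.toList.dropLast 0).map
          (fun (p : Int × Char) => (p.2, (PySem.List.pyGet? st.toList (p.1 + 1)).getD 'X'))).foldl
          pvStep (0, 0) := by rw [List.foldl_map]
    _ = (List.zip st.toList st.toList.tail).foldl pvStep (0, 0) := by
          rw [pvEnum_map_eq]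
    _ = _ := by rw [pvStep_fold]; simp

-- Non-overlapping substring count of a 2-char pattern with distinct characters
-- equals the count of that pair among adjacent pairs.
lemma pvCountGo (a b : Char) (hab : a ≠ b) : ∀ (fuel : Nat) (s : List Char) (acc : Nat),
    s.length ≤ fuel →
    PySem.Chars.count.go [a, b] fuel s acc = acc + (List.zip s s.tail).count (a, b) := by
  intro fuel
  induction fuel with
  | zero =>
    intro s acc hs
    have hnil : s = [] := List.eq_nil_of_length_eq_zero (Nat.le_zero.mp hs)
    subst hnil
    rw [PySem.Chars.count.go]; simp
  | succ n ih =>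
    intro s acc hs
    match s with
    | [] => rw [PySem.Chars.count.go]; simp; omega
    | c :: t =>
      by_cases hpre : [a, b].isPrefixOf (c :: t) = true
      · -- matched: c = a and t starts with b; skip both and count one occurrence
        match t, hpre with
        | [], hpre => simp [List.isPrefixOf] at hpre
        | b' :: t', hpre =>
          obtain ⟨hc, hb'⟩ : a = c ∧ b = b' := by simpa [List.isPrefixOf] using hpre
          subst hc; subst hb'
          have hstep : PySem.Chars.count.go [a, b] (n + 1) (a :: b :: t') acc
              = PySem.Chars.count.go [a, b] n t' (acc + 1) := by
            rw [PySem.Chars.count.go]; simp [List.isPrefixOf]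
          rw [hstep, ih t' (acc + 1) (by simp at hs ⊢; omega)]
          have hzip : (List.zip (a :: b :: t') (b :: t')).count ((a, b) : Char × Char)
              = 1 + (List.zip t' t'.tail).count (a, b) := by
            match t' with
            | [] => simp
            | d :: u =>
              have h1 : ((b, d) : Char × Char) ≠ (a, b) := by
                intro h
                exact hab ((congrArg Prod.fst h).symm)
              simp [h1]; omega
          simp only [List.tail_cons]
          rw [hzip]; omega
      · -- no match at this position: step one character, counts unchanged
        have hstep : PySem.Chars.count.go [a, b] (n + 1) (c :: t) acc
            = PySem.Chars.count.go [a, b] n t acc := by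
          rw [PySem.Chars.count.go]; simp [hpre]
        rw [hstep, ih t acc (by simp at hs; omega)]
        have hzip : (List.zip (c :: t) t).count ((a, b) : Char × Char)
            = (List.zip t t.tail).count (a, b) := by
          match t with
          | [] => simp
          | d :: u =>
            have h1 : ((c, d) : Char × Char) ≠ (a, b) := by
              intro h
              have hc : c = a := congrArg Prod.fst h
              have hd : d = b := congrArg Prod.snd h
              subst hc; subst hd
              simp [List.isPrefixOf] at hpre
            simp [h1]
        simp only [List.tail_cons]
        rw [hzip]

lemma pvCount_pair (s : List Char) (a b : Char) (hab : a ≠ b) :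
    PySem.Chars.count s [a, b] = (List.zip s s.tail).count (a, b) := by
  unfold PySem.Chars.count
  simp only [List.isEmpty_cons, if_false, Bool.false_eq_true]
  have := pvCountGo a b hab s.length s 0 (le_refl _)
  simpa using this

lemma pvB_eq_counts (st : String) :
    cj_jc_counter_alt st
      = (((List.zip st.toList st.toList.tail).count ('C', 'J') : Int),
         ((List.zip st.toList st.toList.tail).count ('J', 'C') : Int)) := by
  unfold cj_jc_counter_alt
  unfold PySem.Str.count
  rw [show ("CJ" : String).toList = ['C', 'J'] from rfl,
      show ("JC" : String).toList = ['J', 'C'] from rfl,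
      pvCount_pair _ _ _ (by decide), pvCount_pair _ _ _ (by decide)]

-- ===== VERDICT (by name: the statement is the Claim_ definition above) =====
theorem cj_jc_counter_spec : Claim_equal_cj_jc_counter := by
  intro st _
  unfold Spec_cj_jc_counter
  rw [pvA_eq_counts, pvB_eq_counts]
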